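-- pv_equiv track=rewrite | github.com/mdbabumiamssm/AI-Agentic-Skills-by-Dr.-Mia | Skills/External_Collections/langchain/libs/partners/prompty/tests/unit_tests/fake_output_parser.py | extract_action_details
-- ===== SOURCE A (Python) =====
-- def extract_action_details(text: str) -> tuple[str | None, str | None]:
--     # Split the text into lines and strip whitespace
--     lines = [line.strip() for line in text.strip().split("\n")]
--
--     # Initialize variables to hold the extracted values
--     action = None
--     action_input = None
--
--     # Iterate through the lines to find and extract the desired information
--     for line in lines:
--         if line.startswith("Action:"):
--             action = line.split(":", 1)[1].strip()
--         elif line.startswith("Action Input:"):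
--             action_input = line.split(":", 1)[1].strip()
--
--     return action, action_input
-- ===== SOURCE B (Python) =====
-- def extract_action_details(text: str) -> tuple[str | None, str | None]:
--     # Parse every "key: value" line into a table (later lines overwrite),
--     # then answer with two lookups.
--     d = {}
--     for raw in text.strip().split("\n"):
--         line = raw.strip()
--         if ":" in line:
--             key, rest = line.split(":", 1)
--             d[key] = rest.strip()
--     return d.get("Action"), d.get("Action Input")
-- ===== Notes on version B (the rewrite author's own statement) =====
-- stated objective: alternative
-- what changed: Replaced the per-line if/elif prefix scan by a uniform parse: every colon line is split once and stored into a dict (later lines overwrite), and the result is two dict lookups of the two keys A scans for.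
import Mathlib
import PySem

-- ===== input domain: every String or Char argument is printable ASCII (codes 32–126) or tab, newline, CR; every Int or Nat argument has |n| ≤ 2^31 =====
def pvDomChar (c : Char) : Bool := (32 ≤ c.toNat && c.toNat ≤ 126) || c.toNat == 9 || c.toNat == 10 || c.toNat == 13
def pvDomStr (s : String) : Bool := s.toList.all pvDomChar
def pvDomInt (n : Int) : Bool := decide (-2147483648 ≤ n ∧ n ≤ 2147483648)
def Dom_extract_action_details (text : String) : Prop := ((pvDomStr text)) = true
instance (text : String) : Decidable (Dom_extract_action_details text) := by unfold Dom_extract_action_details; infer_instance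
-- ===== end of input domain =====

-- B replaces A's per-line if/elif startswith scan by one uniform parse of every "key: value"
-- line into a dict (last occurrence wins) followed by two lookups (objective: alternative).

-- ===== PORT A =====
-- loop body of A's for-loop (line is already stripped)
def pvStepA (st : Option String × Option String) (line : String) : Option String × Option String :=
  if PySem.Str.startswith line "Action:" then
    match PySem.List.pyGet? ((PySem.Str.splitMax? line ":" 1).getD []) 1 with
    | some rest => (some (PySem.Str.strip rest), st.2)
    | none => st   -- unreachable: the "Action:" prefix guarantees a ':' in line, so split(":",1) has 2 parts
  else if PySem.Str.startswith line "Action Input:" then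
    match PySem.List.pyGet? ((PySem.Str.splitMax? line ":" 1).getD []) 1 with
    | some rest => (st.1, some (PySem.Str.strip rest))
    | none => st   -- unreachable, as above
  else st

def extract_action_details (text : String) : Option String × Option String :=
  -- split? with a non-empty separator "\n" is always some; getD [] only unwraps it
  let lines := ((PySem.Str.split? (PySem.Str.strip text) "\n").getD []).map PySem.Str.strip
  lines.foldl pvStepA (none, none)

-- ===== PORT B =====
-- loop body of B's for-loop
def pvStepB (d : PySem.Dict String String) (raw : String) : PySem.Dict String String :=
  -- line = raw.strip() is inlined
  if PySem.Str.isIn ":" (PySem.Str.strip raw) then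
    match (PySem.Str.splitMax? (PySem.Str.strip raw) ":" 1).getD [] with
    | [key, rest] => d.insert key (PySem.Str.strip rest)
    | _ => d   -- unreachable: with a ':' in line, split(":",1) yields exactly two parts
  else d

def extract_action_details_alt (text : String) : Option String × Option String :=
  let d := ((PySem.Str.split? (PySem.Str.strip text) "\n").getD []).foldl pvStepB PySem.Dict.empty
  (d.get? "Action", d.get? "Action Input")

-- ===== PRECONDITION & SPEC =====
def Spec_extract_action_details (text : String) (out : Option String × Option String) : Prop := out = extract_action_details_alt text
instance (text : String) (out : Option String × Option String) : Decidable (Spec_extract_action_details text out) := by unfold Spec_extract_action_details; infer_instance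

-- ===== CLAIM (what is proved, stated in full; the proofs are below) =====
def Claim_equal_extract_action_details : Prop := ∀ (text : String), Dom_extract_action_details text → Spec_extract_action_details text (extract_action_details text)

-- ===== LEMMAS AND PROOFS =====

lemma go_zero (sep : List Char) (fuel : Nat) (l cur : List Char) (acc : List (List Char)) :
    PySem.Chars.splitOnMax.go sep fuel 0 l cur acc = ((cur.reverse ++ l) :: acc).reverse := by
  cases fuel with
  | zero => simp [PySem.Chars.splitOnMax.go]
  | succ n => cases l <;> simp [PySem.Chars.splitOnMax.go]

lemma go_one (c : Char) : ∀ (fuel : Nat) (s cur : List Char) (acc : List (List Char)),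
    s.length < fuel →
    PySem.Chars.splitOnMax.go [c] fuel 1 s cur acc =
      if c ∈ s then acc.reverse ++ [cur.reverse ++ s.takeWhile (· ≠ c), (s.dropWhile (· ≠ c)).tail]
      else acc.reverse ++ [cur.reverse ++ s] := by
  intro fuel
  induction fuel with
  | zero => intro s cur acc h; omega
  | succ n ih =>
    intro s cur acc h
    cases s with
    | nil => simp [PySem.Chars.splitOnMax.go]
    | cons a rest =>
      by_cases hac : a = c
      · subst hac
        simp only [PySem.Chars.splitOnMax.go, List.isPrefixOf, if_neg (by omega : ¬(1:Nat) = 0)]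
        simp [go_zero]
      · have hpre : [c].isPrefixOf (a :: rest) = false := by
          simp [List.isPrefixOf]; intro h'; exact absurd h'.symm hac
        simp only [PySem.Chars.splitOnMax.go]
        rw [if_neg (by omega : ¬(1:Nat) = 0), hpre]
        simp only [Bool.false_eq_true, if_false]
        rw [ih rest (a :: cur) acc (by simpa using Nat.lt_of_succ_lt_succ h)]
        by_cases hm : c ∈ rest <;> simp [hm, hac, Ne.symm hac]

lemma splitOnMax_colon (s : List Char) :
    PySem.Chars.splitOnMax s [':'] 1 =
      if ':' ∈ s then [s.takeWhile (· ≠ ':'), (s.dropWhile (· ≠ ':')).tail] else [s] := by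
  rw [PySem.Chars.splitOnMax]
  rw [if_neg (by omega)]
  norm_num
  rw [go_one ':' _ _ _ _ (by omega)]
  split <;> simp

lemma takeWhile_append_stop {p : Char → Bool} (key t : List Char) (a : Char)
    (h : ∀ x ∈ key, p x = true) (h2 : p a = false) :
    (key ++ a :: t).takeWhile p = key ∧ (key ++ a :: t).dropWhile p = a :: t := by
  induction key with
  | nil => simp [h2]
  | cons b bs ih =>
    have hb : p b = true := h b (by simp)
    have := ih (fun x hx => h x (by simp [hx]))
    simp [hb, this]

lemma startswith_key_iff (cs key : List Char) (hk : ':' ∉ key) :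
    (key ++ [':']).isPrefixOf cs = true ↔ (':' ∈ cs ∧ cs.takeWhile (· ≠ ':') = key) := by
  constructor
  · intro h
    obtain ⟨t, ht⟩ := (List.isPrefixOf_iff_prefix.mp h)
    have hcs : cs = key ++ ':' :: t := by simpa using ht.symm
    subst hcs
    refine ⟨by simp, ?_⟩
    exact (takeWhile_append_stop key t ':'
      (fun x hx => by simp; rintro rfl; exact hk hx) (by simp)).1
  · rintro ⟨hm, htw⟩
    have hdw : cs.dropWhile (· ≠ ':') ≠ [] := by
      intro h
      have := List.dropWhile_eq_nil_iff.mp h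
      simp at this
      exact absurd rfl (this _ hm)
    obtain ⟨d, tl, hd⟩ := List.exists_cons_of_ne_nil hdw
    have hdc : d = ':' := by
      have h2 := List.head_dropWhile_not (p := fun x => decide (x ≠ ':')) hdw
      simp only [hd, List.head_cons] at h2
      simpa using h2
    rw [List.isPrefixOf_iff_prefix]
    refine ⟨tl, ?_⟩
    have := List.takeWhile_append_dropWhile (p := fun x => decide (x ≠ ':')) (l := cs)
    rw [htw, hd, hdc] at this
    simpa using this

lemma isIn_colon (cs : List Char) : PySem.Chars.isIn [':'] cs = true ↔ ':' ∈ cs := by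
  rw [PySem.Chars.isIn_iff_infix]
  constructor
  · intro h; exact h.mem (by simp)
  · intro h
    obtain ⟨l1, l2, hl⟩ := List.append_of_mem h
    exact ⟨l1, l2, by simp [hl]⟩

lemma startswith_str (s : String) (key : List Char) (hk : ':' ∉ key) :
    PySem.Str.startswith s (String.ofList (key ++ [':'])) = true ↔
      (':' ∈ s.toList ∧ s.toList.takeWhile (· ≠ ':') = key) := by
  rw [show PySem.Str.startswith s (String.ofList (key ++ [':']))
        = PySem.Chars.startswith s.toList (key ++ [':']) by
      simp [PySem.Str.startswith]]
  exact startswith_key_iff s.toList key hk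

lemma parts_eq (s : String) :
    (PySem.Str.splitMax? s ":" 1).getD [] =
      if ':' ∈ s.toList then
        [String.ofList (s.toList.takeWhile (· ≠ ':')),
         String.ofList ((s.toList.dropWhile (· ≠ ':')).tail)]
      else [s] := by
  rw [PySem.Str.splitMax?]
  rw [show (":" : String).toList = [':'] from rfl]
  rw [PySem.Chars.splitMax?, if_neg (by simp)]
  rw [splitOnMax_colon]
  split <;> simp

-- the per-line step: A's accumulator pair tracks B's dict lookups
lemma step_agree (raw : String) (d : PySem.Dict String String) (st : Option String × Option String)
    (h1 : d.get? "Action" = st.1) (h2 : d.get? "Action Input" = st.2) :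
    (pvStepB d raw).get? "Action" = (pvStepA st (PySem.Str.strip raw)).1 ∧
    (pvStepB d raw).get? "Action Input" = (pvStepA st (PySem.Str.strip raw)).2 := by
  set s := PySem.Str.strip raw with hs
  have hneAI : ("Action Input" : String) ≠ "Action" := by decide
  have hneA : ("Action" : String) ≠ "Action Input" := by decide
  have hA : PySem.Str.startswith s "Action:" = true ↔
      (':' ∈ s.toList ∧ s.toList.takeWhile (· ≠ ':') = "Action".toList) := by
    have := startswith_str s "Action".toList (by decide)
    rwa [show String.ofList ("Action".toList ++ [':']) = "Action:" from rfl] at this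
  have hAI : PySem.Str.startswith s "Action Input:" = true ↔
      (':' ∈ s.toList ∧ s.toList.takeWhile (· ≠ ':') = "Action Input".toList) := by
    have := startswith_str s "Action Input".toList (by decide)
    rwa [show String.ofList ("Action Input".toList ++ [':']) = "Action Input:" from rfl] at this
  have hIn : PySem.Str.isIn ":" s = true ↔ ':' ∈ s.toList := by
    rw [PySem.Str.isIn, show (":" : String).toList = [':'] from rfl]
    exact isIn_colon s.toList
  by_cases hc : ':' ∈ s.toList
  · have hparts := parts_eq s
    rw [if_pos hc] at hparts
    by_cases hk : s.toList.takeWhile (· ≠ ':') = "Action".toList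
    · have hsw : PySem.Str.startswith s "Action:" = true := hA.mpr ⟨hc, hk⟩
      have hkey : String.ofList (s.toList.takeWhile (· ≠ ':')) = "Action" := by
        rw [hk]; simp
      unfold pvStepA pvStepB
      rw [← hs, if_pos (hIn.mpr hc), hparts, hkey, hsw]
      simp [PySem.List.pyGet?, PySem.List.pyIdx?,
        PySem.Dict.get?_insert_self, PySem.Dict.get?_insert_of_ne d _ hneAI, h2]
    · by_cases hk2 : s.toList.takeWhile (· ≠ ':') = "Action Input".toList
      · have hsw : PySem.Str.startswith s "Action:" = false := by
          rw [Bool.eq_false_iff]; intro h; exact hk (hA.mp h).2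
        have hsw2 : PySem.Str.startswith s "Action Input:" = true := hAI.mpr ⟨hc, hk2⟩
        have hkey : String.ofList (s.toList.takeWhile (· ≠ ':')) = "Action Input" := by
          rw [hk2]; simp
        unfold pvStepA pvStepB
        rw [← hs, if_pos (hIn.mpr hc), hparts, hkey, hsw, hsw2]
        simp [PySem.List.pyGet?, PySem.List.pyIdx?,
          PySem.Dict.get?_insert_self, PySem.Dict.get?_insert_of_ne d _ hneA, h1]
      · have hsw : PySem.Str.startswith s "Action:" = false := by
          rw [Bool.eq_false_iff]; intro h; exact hk (hA.mp h).2
        have hsw2 : PySem.Str.startswith s "Action Input:" = false := by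
          rw [Bool.eq_false_iff]; intro h; exact hk2 (hAI.mp h).2
        have hne1 : ("Action" : String) ≠ String.ofList (s.toList.takeWhile (· ≠ ':')) := by
          intro h
          apply hk
          have := congrArg String.toList h
          simpa using this.symm
        have hne2 : ("Action Input" : String) ≠ String.ofList (s.toList.takeWhile (· ≠ ':')) := by
          intro h
          apply hk2
          have := congrArg String.toList h
          simpa using this.symm
        simp only [ne_eq, decide_not] at hne1 hne2
        unfold pvStepA pvStepB
        rw [← hs, if_pos (hIn.mpr hc), hparts, hsw, hsw2]
        simp only [ne_eq, decide_not]
        simp [PySem.Dict.get?_insert_of_ne d _ hne1, PySem.Dict.get?_insert_of_ne d _ hne2, h1, h2]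
  · have hsw : PySem.Str.startswith s "Action:" = false := by
      rw [Bool.eq_false_iff]; intro h; exact hc (hA.mp h).1
    have hsw2 : PySem.Str.startswith s "Action Input:" = false := by
      rw [Bool.eq_false_iff]; intro h; exact hc (hAI.mp h).1
    have hin : PySem.Str.isIn ":" s = false := by
      rw [Bool.eq_false_iff]; intro h; exact hc (hIn.mp h)
    unfold pvStepA pvStepB
    rw [← hs, hin, hsw, hsw2]
    exact ⟨h1, h2⟩

lemma fold_agree (raws : List String) : ∀ (d : PySem.Dict String String)
    (st : Option String × Option String),
    d.get? "Action" = st.1 → d.get? "Action Input" = st.2 →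
    ((raws.foldl pvStepB d).get? "Action", (raws.foldl pvStepB d).get? "Action Input")
      = (raws.map PySem.Str.strip).foldl pvStepA st := by
  induction raws with
  | nil => intro d st h1 h2; simp [h1, h2]
  | cons r rs ih =>
    intro d st h1 h2
    have := step_agree r d st h1 h2
    simpa using ih (pvStepB d r) (pvStepA st (PySem.Str.strip r)) this.1 this.2

-- ===== VERDICT (by name: the statement is the Claim_ definition above) =====
theorem extract_action_details_spec : Claim_equal_extract_action_details := by
  intro text _
  unfold Spec_extract_action_details extract_action_details extract_action_details_alt
  exact (fold_agree _ PySem.Dict.empty (none, none)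
    (PySem.Dict.get?_empty _) (PySem.Dict.get?_empty _)).symm
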